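-- pv_equiv track=rewrite | github.com/ldct/cp | FHC/2021/round-1/A2/A2.py | ans_slow
-- ===== SOURCE A (Python) =====
-- def ans_slow(S):
--     def F(S):
--         S = S.replace('F', '')
--         ret = 0
--         for i in range(len(S)-1):
--             if S[i] != S[i+1]:
--                 ret += 1
--         return ret
--
--     ret = 0
--     for i in range(len(S)+1):
--         for j in range(i, len(S)+1):
--             ret += F(S[i:j])
--     return ret
-- ===== SOURCE B (Python) =====
-- def ans_slow(S):
--     # One pass: maintain suff = sum of F over all suffixes of the prefix read
--     # so far, and total = sum of F over all substrings; appending c adds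
--     # (p+1) to suff when the last non-'F' char differs from c (p its index).
--     total = 0
--     suff = 0
--     last = None
--     p1 = 0
--     pos = 0
--     for c in S:
--         pos += 1
--         if c != 'F' and last is not None and last != c:
--             suff += p1
--         total += suff
--         if c != 'F':
--             last = c
--             p1 = pos
--     return total
-- ===== Notes on version B (the rewrite author's own statement) =====
-- stated objective: faster
-- what changed: Replaces the O(n^3)-substring enumeration (F recomputed on every slice) by a single left-to-right pass that maintains the running total, the suffix-sum of F over all suffixes of the prefix read so far, and the last non-'F' character with its position.
import Mathlib
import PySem

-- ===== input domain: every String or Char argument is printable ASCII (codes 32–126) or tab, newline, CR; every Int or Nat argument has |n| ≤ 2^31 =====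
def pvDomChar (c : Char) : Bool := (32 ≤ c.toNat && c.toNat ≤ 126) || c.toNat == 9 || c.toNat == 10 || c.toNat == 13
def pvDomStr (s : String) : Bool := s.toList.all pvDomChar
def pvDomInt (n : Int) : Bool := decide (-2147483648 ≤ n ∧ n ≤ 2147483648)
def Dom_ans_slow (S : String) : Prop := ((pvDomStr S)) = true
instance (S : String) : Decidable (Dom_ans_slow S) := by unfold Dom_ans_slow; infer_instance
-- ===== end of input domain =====

-- B replaces A's cubic enumeration of all substrings by a single left-to-right
-- pass maintaining the suffix-sum of F and the last non-'F' character (objective: faster).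

-- ===== PORT A =====
-- the inner helper F: strip 'F', count differing adjacent pairs
def ansF (s : List Char) : Int :=
  let t := PySem.Chars.replace s ['F'] []
  (PySem.List.pyRange 0 ((t.length : Int) - 1) 1).foldl
    (fun ret i =>
      if PySem.List.pyGetD t i ' ' ≠ PySem.List.pyGetD t (i + 1) ' ' then ret + 1 else ret) 0

def ans_slow (S : String) : Int :=
  let L := S.toList
  (PySem.List.pyRange 0 ((L.length : Int) + 1) 1).foldl
    (fun ret i =>
      (PySem.List.pyRange i ((L.length : Int) + 1) 1).foldl
        (fun ret j => ret + ansF (PySem.List.slice L (some i) (some j))) ret) 0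

-- ===== PORT B =====
-- state: (total, suff, last non-'F' char, its index + 1, chars processed)
def stepB (st : Int × Int × Option Char × Int × Int) (c : Char) :
    Int × Int × Option Char × Int × Int :=
  match st with
  | (total, suff, last, p1, pos) =>
    let pos := pos + 1
    let suff := if (c != 'F') && (match last with | some b => b != c | none => false)
                then suff + p1 else suff
    let total := total + suff
    if c != 'F' then (total, suff, some c, pos, pos) else (total, suff, last, p1, pos)

def ans_slow_alt (S : String) : Int :=
  (S.toList.foldl stepB (0, 0, none, 0, 0)).1

-- ===== PRECONDITION & SPEC =====
def Spec_ans_slow (S : String) (out : Int) : Prop := out = ans_slow_alt S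
instance (S : String) (out : Int) : Decidable (Spec_ans_slow S out) := by
  unfold Spec_ans_slow; infer_instance

-- ===== CLAIM (what is proved, stated in full; the proofs are below) =====
def Claim_equal_ans_slow : Prop := ∀ (S : String), Dom_ans_slow S → Spec_ans_slow S (ans_slow S)

-- ===== LEMMAS AND PROOFS =====

-- adjacent differing pairs
def adj : List Char → Int
  | a :: b :: t => (if a ≠ b then 1 else 0) + adj (b :: t)
  | _ => 0

-- the value of Python's F on a raw list
def fF (l : List Char) : Int := adj (l.filter (fun c => c ≠ 'F'))

-- last non-'F' character
def lastNF (l : List Char) : Option Char := l.reverse.find? (fun x => x ≠ 'F')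

def p1rev : List Char → Int
  | [] => 0
  | c :: r => if c ≠ 'F' then (r.length : Int) + 1 else p1rev r

-- index of the last non-'F' character, plus one (0 if none)
def P1 (l : List Char) : Int := p1rev l.reverse

-- increment of fF when c is appended
def del (l : List Char) (c : Char) : Int :=
  if c = 'F' then 0 else
    match lastNF l with
    | some b => if b = c then 0 else 1
    | none => 0

-- increment of G when c is appended
def Dc (l : List Char) (c : Char) : Int :=
  if c = 'F' then 0 else
    match lastNF l with
    | some b => if b = c then 0 else P1 l
    | none => 0

-- sum of fF over all suffixes
def G : List Char → Int
  | [] => 0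
  | a :: l => fF (a :: l) + G l

def Trev : List Char → Int
  | [] => 0
  | c :: r => Trev r + G (r.reverse ++ [c])

-- sum of fF over all substrings
def Tl (l : List Char) : Int := Trev l.reverse

-- prefix sums / the clean form of A's double loop
def Hp (m : List Char) : Int := ((List.range (m.length + 1)).map (fun d => fF (m.take d))).sum
def Tsum (l : List Char) : Int := ((List.range (l.length + 1)).map (fun i => Hp (l.drop i))).sum

lemma replace_go_filter (fuel : Nat) : ∀ (l acc : List Char), l.length ≤ fuel →
    PySem.Chars.replace.go ['F'] [] fuel l acc = acc.reverse ++ l.filter (fun c => c ≠ 'F') := by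
  induction fuel with
  | zero => intro l acc h; rw [PySem.Chars.replace.go.eq_def]; simp at h; simp [h]
  | succ n ih =>
    intro l acc h
    cases l with
    | nil => rw [PySem.Chars.replace.go.eq_def]; simp
    | cons c t =>
      have hstep : PySem.Chars.replace.go ['F'] [] (n+1) (c::t) acc =
          (if ['F'].isPrefixOf (c::t) = true
           then PySem.Chars.replace.go ['F'] [] n (List.drop 1 (c::t)) acc
           else PySem.Chars.replace.go ['F'] [] n t (c :: acc)) := by
        rw [PySem.Chars.replace.go.eq_def]; rfl
      rw [hstep]
      simp only [List.length_cons] at h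
      by_cases hc : c = 'F'
      · subst hc
        have : (['F'].isPrefixOf ('F' :: t)) = true := by simp [List.isPrefixOf]
        rw [this]
        simp only [if_true, List.drop_succ_cons, List.drop_zero]
        rw [ih t acc (by omega)]
        simp
      · have hb : ('F' == c) = false := beq_eq_false_iff_ne.mpr (Ne.symm hc)
        have : (['F'].isPrefixOf (c :: t)) = false := by simp [List.isPrefixOf, hb]
        rw [this]
        simp only [Bool.false_eq_true, if_false]
        rw [ih t (c :: acc) (by omega)]
        simp [hc]

lemma replace_F (l : List Char) :
    PySem.Chars.replace l ['F'] [] = l.filter (fun c => c ≠ 'F') := by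
  rw [PySem.Chars.replace]
  simp only [List.isEmpty_cons, Bool.false_eq_true, if_false]
  rw [replace_go_filter l.length l [] le_rfl]
  simp

lemma adj_sum (s : List Char) :
    adj s = ((List.range (s.length - 1)).map
      (fun k => if s.getD k ' ' ≠ s.getD (k + 1) ' ' then (1 : Int) else 0)).sum := by
  induction s with
  | nil => simp [adj]
  | cons a t ih =>
    cases t with
    | nil => simp [adj]
    | cons b t' =>
      rw [adj]
      simp only [List.length_cons]
      have hlen : t'.length + 1 + 1 - 1 = t'.length + 1 := by omega
      rw [hlen, List.range_succ_eq_map]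
      simp only [List.map_cons, List.map_map, List.sum_cons]
      rw [ih]
      simp only [List.length_cons, Nat.add_sub_cancel]
      rfl

lemma foldl_if_inc (p : Int → Prop) [DecidablePred p] (xs : List Int) (a : Int) :
    xs.foldl (fun ret i => if p i then ret + 1 else ret) a
      = a + (xs.map (fun i => if p i then (1 : Int) else 0)).sum := by
  induction xs generalizing a with
  | nil => simp
  | cons x xs ih => by_cases h : p x <;> simp [h, ih] <;> ring

lemma ansF_eq_fF (s : List Char) : ansF s = fF s := by
  have hrep := replace_F s
  rw [ansF]
  set t := PySem.Chars.replace s ['F'] [] with ht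
  rw [foldl_if_inc, PySem.List.pyRange_one]
  have htn : ((t.length : Int) - 1 - 0).toNat = t.length - 1 := by omega
  rw [htn]
  simp only [List.map_map, zero_add]
  have : ∀ k : Nat, (fun i => if PySem.List.pyGetD t i ' ' ≠ PySem.List.pyGetD t (i+1) ' ' then (1:Int) else 0) ((fun k : Nat => (k : Int)) k)
      = (fun k : Nat => if t.getD k ' ' ≠ t.getD (k+1) ' ' then (1:Int) else 0) k := by
    intro k
    have h1 : ((k : Int) + 1) = ((k + 1 : Nat) : Int) := by push_cast; ring
    simp only []
    rw [h1, PySem.List.pyGetD_natCast, PySem.List.pyGetD_natCast]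
  rw [show ((fun i => if PySem.List.pyGetD t i ' ' ≠ PySem.List.pyGetD t (i+1) ' ' then (1:Int) else 0) ∘ (fun k : Nat => (k : Int)))
      = (fun k : Nat => if t.getD k ' ' ≠ t.getD (k+1) ' ' then (1:Int) else 0) from funext this]
  rw [fF, ← hrep]
  exact (adj_sum t).symm

lemma lastNF_cons (a : Char) (l : List Char) :
    lastNF (a :: l) = match lastNF l with
      | some b => some b
      | none => if a ≠ 'F' then some a else none := by
  rw [lastNF, lastNF, List.reverse_cons, List.find?_append]
  cases h : l.reverse.find? (fun x => x ≠ 'F') with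
  | some b => simp
  | none =>
    by_cases ha : a = 'F' <;> simp [List.find?, ha]

lemma p1rev_append (r : List Char) (a : Char) :
    p1rev (r ++ [a]) = match r.find? (fun x => x ≠ 'F') with
      | some _ => p1rev r + 1
      | none => if a ≠ 'F' then 1 else 0 := by
  induction r with
  | nil => by_cases ha : a = 'F' <;> simp [p1rev, List.find?, ha]
  | cons c r ih =>
    by_cases hc : c = 'F'
    · subst hc
      simp only [List.cons_append, p1rev, ne_eq, not_true_eq_false, if_false, ih, List.find?]
      rfl
    · simp only [List.cons_append, p1rev, ne_eq, hc, not_false_eq_true, if_true,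
        List.length_append, List.length_cons]
      have : (List.find? (fun x => decide (x ≠ 'F')) (c :: r)) = some c := by
        simp [List.find?, hc]
      rw [this]
      simp

lemma P1_cons (a : Char) (l : List Char) :
    P1 (a :: l) = match lastNF l with
      | some _ => P1 l + 1
      | none => if a ≠ 'F' then 1 else 0 := by
  rw [P1, List.reverse_cons, p1rev_append]
  rfl

lemma adj_append (K : List Char) (c : Char) :
    adj (K ++ [c]) = adj K + (match K.getLast? with
      | some b => if b = c then 0 else 1
      | none => 0) := by
  induction K with
  | nil => simp [adj]
  | cons a K ih =>
    cases K with
    | nil => by_cases h : a = c <;> simp [adj, h]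
    | cons b t =>
      have h1 : (a :: b :: t) ++ [c] = a :: b :: (t ++ [c]) := by simp
      rw [h1, adj, adj]
      rw [show b :: (t ++ [c]) = (b :: t) ++ [c] from by simp, ih, List.getLast?_cons_cons]
      ring

lemma lastNF_eq_getLast?_filter (l : List Char) :
    (l.filter (fun c => c ≠ 'F')).getLast? = lastNF l := by
  rw [lastNF, ← List.head?_reverse, ← List.filter_reverse]
  exact List.head?_filter

lemma fF_append (m : List Char) (c : Char) : fF (m ++ [c]) = fF m + del m c := by
  rw [fF, fF, del, List.filter_append]
  by_cases hc : c = 'F'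
  · simp [hc]
  · simp only [List.filter_cons, ne_eq, not_false_eq_true, decide_true, List.filter_nil,
      if_true, hc, if_false]
    rw [adj_append, ← lastNF_eq_getLast?_filter]

lemma Dc_cons (a : Char) (l : List Char) (c : Char) :
    Dc (a :: l) c = del (a :: l) c + Dc l c := by
  by_cases hc : c = 'F'
  · simp [Dc, del, hc]
  · rw [Dc, Dc, del, if_neg hc, if_neg hc, if_neg hc, lastNF_cons, P1_cons]
    cases h : lastNF l with
    | some b =>
      by_cases hb : b = c
      · simp [hb]
      · simp only [hb, if_false]; ring
    | none =>
      by_cases ha : a = 'F' <;> simp [ha]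

lemma G_append (l : List Char) (c : Char) : G (l ++ [c]) = G l + Dc l c := by
  induction l with
  | nil =>
    rw [List.nil_append, G, G, Dc]
    have : fF [c] = 0 := by rw [fF]; by_cases h : c = 'F' <;> simp [h, adj]
    simp [this, lastNF, G]
  | cons a l ih =>
    rw [List.cons_append, G, G, ih, show a :: (l ++ [c]) = (a :: l) ++ [c] from by simp,
      fF_append, Dc_cons]
    ring

lemma Tl_append (l : List Char) (c : Char) : Tl (l ++ [c]) = Tl l + G (l ++ [c]) := by
  rw [Tl, Tl, List.reverse_append, List.reverse_singleton, List.singleton_append, Trev,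
    List.reverse_reverse]

lemma G_eq_sum (m : List Char) :
    G m = ((List.range m.length).map (fun i => fF (m.drop i))).sum := by
  induction m with
  | nil => simp [G]
  | cons a l ih =>
    rw [G, ih, List.length_cons, List.range_succ_eq_map]
    simp only [List.map_cons, List.map_map, List.sum_cons, List.drop_zero]
    rfl

lemma Hp_append (m : List Char) (c : Char) : Hp (m ++ [c]) = Hp m + fF (m ++ [c]) := by
  rw [Hp, Hp]
  simp only [List.length_append, List.length_singleton]
  rw [List.range_succ, List.map_append, List.sum_append]
  congr 1
  · congr 1
    apply List.map_congr_left
    intro d hd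
    simp only [List.mem_range] at hd
    rw [List.take_append_of_le_length (by omega)]
  · simp [List.take_of_length_le]

lemma Tsum_eq_Tl (l : List Char) : Tsum l = Tl l := by
  induction l using List.reverseRecOn with
  | nil => simp [Tsum, Hp, Tl, Trev, fF, adj]
  | append_singleton l c ih =>
    rw [Tsum]
    simp only [List.length_append, List.length_singleton]
    rw [List.range_succ, List.map_append, List.sum_append]
    have hlast : Hp ((l ++ [c]).drop (l.length + 1)) = 0 := by
      rw [show (l ++ [c]).drop (l.length + 1) = [] from by
        apply List.drop_of_length_le; simp]
      simp [Hp, fF, adj]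
    have hmap : (List.range (l.length + 1)).map (fun i => Hp ((l ++ [c]).drop i))
        = (List.range (l.length + 1)).map (fun i => Hp (l.drop i) + fF ((l ++ [c]).drop i)) := by
      apply List.map_congr_left
      intro i hi
      simp only [List.mem_range] at hi
      rw [List.drop_append_of_le_length (by omega), Hp_append]
    rw [hmap, PySem.List.sum_map_add_int]
    have hG : (List.map (fun i => fF ((l ++ [c]).drop i)) (List.range (l.length + 1))).sum
        = G (l ++ [c]) := by
      rw [G_eq_sum (l ++ [c])]
      simp
    rw [hG]
    simp only [List.map_cons, List.map_nil, List.sum_cons, List.sum_nil, add_zero]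
    rw [hlast, ← Tsum, ih, Tl_append]
    ring

lemma ansA_eq_Tsum (L : List Char) :
    (PySem.List.pyRange 0 ((L.length : Int) + 1) 1).foldl
      (fun ret i =>
        (PySem.List.pyRange i ((L.length : Int) + 1) 1).foldl
          (fun ret j => ret + ansF (PySem.List.slice L (some i) (some j))) ret) 0 = Tsum L := by
  rw [PySem.List.pyRange_one, show ((L.length : Int) + 1 - 0).toNat = L.length + 1 by omega,
    List.foldl_map]
  rw [PySem.List.foldl_congr_mem _ _
    (fun ret (k : Nat) => ret + Hp (L.drop k)) 0 ?_]
  · rw [PySem.List.foldl_add]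
    simp [Tsum]
  · intro acc k hk
    simp only [List.mem_range] at hk
    simp only [zero_add]
    rw [PySem.List.pyRange_one, show ((L.length : Int) + 1 - (k : Int)).toNat = L.length + 1 - k by omega,
      List.foldl_map, PySem.List.foldl_add]
    congr 1
    rw [Hp]
    have hlen : (L.drop k).length + 1 = L.length + 1 - k := by
      simp [List.length_drop]; omega
    rw [hlen]
    refine congrArg List.sum (List.map_congr_left ?_)
    intro d hd
    have hcast : ((k : Int) + (d : Int)) = ((k + d : Nat) : Int) := by push_cast; ring
    rw [hcast, PySem.List.slice_natCast L k (k + d), Nat.add_sub_cancel_left, ansF_eq_fF]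

lemma lastNF_append (l : List Char) (c : Char) :
    lastNF (l ++ [c]) = if c ≠ 'F' then some c else lastNF l := by
  rw [lastNF, List.reverse_append, List.reverse_singleton, List.singleton_append, List.find?]
  by_cases hc : c = 'F' <;> simp [hc, lastNF]

lemma P1_append (l : List Char) (c : Char) :
    P1 (l ++ [c]) = if c ≠ 'F' then (l.length : Int) + 1 else P1 l := by
  rw [P1, List.reverse_append, List.reverse_singleton, List.singleton_append, p1rev]
  by_cases hc : c = 'F' <;> simp [hc, P1]

lemma foldB (l : List Char) :
    l.foldl stepB (0, 0, none, 0, 0) = (Tl l, G l, lastNF l, P1 l, (l.length : Int)) := by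
  induction l using List.reverseRecOn with
  | nil => simp [Tl, Trev, G, lastNF, P1, p1rev]
  | append_singleton l c ih =>
    rw [List.foldl_append, ih, List.foldl_cons, List.foldl_nil, stepB.eq_def]
    have hGlc : G (l ++ [c]) = G l + Dc l c := G_append l c
    by_cases hc : c = 'F'
    · subst hc
      simp only [bne_self_eq_false, Bool.false_and, Bool.false_eq_true, if_false]
      rw [Tl_append, hGlc, lastNF_append, P1_append]
      simp [Dc, List.length_append]
    · have hbne : (c != 'F') = true := by simp [hc]
      rw [hbne]
      simp only [Bool.true_and, if_true]
      rw [Tl_append, hGlc, lastNF_append, P1_append]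
      simp only [ne_eq, hc, not_false_eq_true, if_true]
      have hsuff : (if (match (lastNF l) with | some b => b != c | none => false) = true
          then G l + P1 l else G l) = G l + Dc l c := by
        rw [Dc, if_neg hc]
        cases h : lastNF l with
        | some b => by_cases hb : b = c <;> simp [hb]
        | none => simp
      rw [hsuff]
      simp [List.length_append]

-- ===== VERDICT (by name: the statement is the Claim_ definition above) =====
theorem ans_slow_spec : Claim_equal_ans_slow := by
  intro S _
  unfold Spec_ans_slow ans_slow ans_slow_alt
  rw [ansA_eq_Tsum, Tsum_eq_Tl, foldB]
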